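-- pv_equiv track=rewrite | github.com/accolombini/protecai_testes | enhanced_relay_analyzer.py | _classify_protection_function
-- ===== SOURCE A (Python) =====
-- from typing import Dict, List, Tuple, Optional, Any
--
-- def _classify_protection_function(code: str, description: str, value: str) -> Optional[str]:
--     """Classifica o tipo de função de proteção"""
--
--     desc_lower = description.lower()
--
--     # Sobrecorrente
--     if any(keyword in desc_lower for keyword in ['overcurrent', 'i>>', 'i>', 'short circuit']):
--         return 'overcurrent'
--
--     # Terra
--     if any(keyword in desc_lower for keyword in ['earth', 'ground', 'residual', 'i0>', 'sef']):
--         return 'earth_fault'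
--
--     # Térmica
--     if any(keyword in desc_lower for keyword in ['thermal', 'overload', 'temperature', 'ith']):
--         return 'thermal'
--
--     # Sequência negativa
--     if any(keyword in desc_lower for keyword in ['negative', 'i2>', 'unbalance']):
--         return 'negative_sequence'
--
--     # Tensão
--     if any(keyword in desc_lower for keyword in ['voltage', 'v<', 'v>', 'under', 'over']):
--         return 'voltage'
--
--     # Motor
--     if any(keyword in desc_lower for keyword in ['stall', 'start', 'motor', 'rotor', 'locked']):
--         return 'motor'
--
--     return None
-- ===== SOURCE B (Python) =====
-- # B: single left-to-right scan of the lowered description; at each position it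
-- # checks which keywords start there (flat keyword -> priority table) and keeps
-- # the minimum priority seen; the answer is the label of that minimum priority.
-- # A instead runs six staged whole-string substring searches in priority order.
-- _KEYWORDS = (
--     ("overcurrent", 0), ("i>>", 0), ("i>", 0), ("short circuit", 0),
--     ("earth", 1), ("ground", 1), ("residual", 1), ("i0>", 1), ("sef", 1),
--     ("thermal", 2), ("overload", 2), ("temperature", 2), ("ith", 2),
--     ("negative", 3), ("i2>", 3), ("unbalance", 3),
--     ("voltage", 4), ("v<", 4), ("v>", 4), ("under", 4), ("over", 4),
--     ("stall", 5), ("start", 5), ("motor", 5), ("rotor", 5), ("locked", 5),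
-- )
-- _LABELS = ("overcurrent", "earth_fault", "thermal", "negative_sequence", "voltage", "motor")
--
-- def _classify_protection_function(code, description, value):
--     d = description.lower()
--     best = 6
--     for i in range(len(d)):
--         for kw, pri in _KEYWORDS:
--             if pri < best and d.startswith(kw, i):
--                 best = pri
--     return _LABELS[best] if best < 6 else None
-- ===== Notes on version B (the rewrite author's own statement) =====
-- stated objective: alternative
-- what changed: B replaces A's six staged whole-string substring searches by a single left-to-right scan of the lowered description that tests a flat keyword->priority table at each position and keeps the minimum matched priority, returning its label.
import Mathlib
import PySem

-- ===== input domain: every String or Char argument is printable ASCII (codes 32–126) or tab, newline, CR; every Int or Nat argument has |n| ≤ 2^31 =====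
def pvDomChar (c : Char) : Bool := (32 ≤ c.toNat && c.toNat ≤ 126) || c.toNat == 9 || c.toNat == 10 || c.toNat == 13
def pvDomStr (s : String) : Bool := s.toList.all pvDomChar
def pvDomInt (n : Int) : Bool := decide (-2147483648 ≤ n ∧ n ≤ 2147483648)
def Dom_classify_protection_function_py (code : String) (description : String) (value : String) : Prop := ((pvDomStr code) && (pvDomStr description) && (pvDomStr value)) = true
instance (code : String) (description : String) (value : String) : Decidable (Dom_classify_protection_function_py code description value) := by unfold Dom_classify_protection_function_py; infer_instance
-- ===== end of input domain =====

-- ===== PORT A =====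
-- B replaces A's six staged substring searches by one positional scan keeping the minimum
-- matched keyword priority (objective: alternative algorithm, same asymptotic cost).
def classify_protection_function_py (code : String) (description : String) (value : String) : Option String :=
  let desc_lower := PySem.Str.lower description
  if ["overcurrent", "i>>", "i>", "short circuit"].any (fun k => PySem.Str.isIn k desc_lower) then some "overcurrent"
  else if ["earth", "ground", "residual", "i0>", "sef"].any (fun k => PySem.Str.isIn k desc_lower) then some "earth_fault"
  else if ["thermal", "overload", "temperature", "ith"].any (fun k => PySem.Str.isIn k desc_lower) then some "thermal"
  else if ["negative", "i2>", "unbalance"].any (fun k => PySem.Str.isIn k desc_lower) then some "negative_sequence"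
  else if ["voltage", "v<", "v>", "under", "over"].any (fun k => PySem.Str.isIn k desc_lower) then some "voltage"
  else if ["stall", "start", "motor", "rotor", "locked"].any (fun k => PySem.Str.isIn k desc_lower) then some "motor"
  else none

-- ===== PORT B =====
def pvKeywords : List (String × Nat) :=
  [("overcurrent", 0), ("i>>", 0), ("i>", 0), ("short circuit", 0),
   ("earth", 1), ("ground", 1), ("residual", 1), ("i0>", 1), ("sef", 1),
   ("thermal", 2), ("overload", 2), ("temperature", 2), ("ith", 2),
   ("negative", 3), ("i2>", 3), ("unbalance", 3),
   ("voltage", 4), ("v<", 4), ("v>", 4), ("under", 4), ("over", 4),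
   ("stall", 5), ("start", 5), ("motor", 5), ("rotor", 5), ("locked", 5)]

def pvLabels : List String :=
  ["overcurrent", "earth_fault", "thermal", "negative_sequence", "voltage", "motor"]

-- the inner `for kw, pri in _KEYWORDS` loop at one position (l = suffix of the text at position i)
def pvStep (l : List Char) (best : Nat) (K : List (String × Nat)) : Nat :=
  K.foldl (fun b kp => if kp.2 < b ∧ PySem.Chars.startswith l kp.1.toList = true then kp.2 else b) best

-- the outer `for i in range(len(d))` loop: structural recursion over the suffixes of d
def pvScan (K : List (String × Nat)) (best : Nat) : List Char → Nat
  | [] => best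
  | c :: rest => pvScan K (pvStep (c :: rest) best K) rest

def classify_protection_function_py_alt (code : String) (description : String) (value : String) : Option String :=
  let d := PySem.Str.lower description
  let best := pvScan pvKeywords 6 d.toList
  if best < 6 then pvLabels[best]? else none

-- ===== PRECONDITION & SPEC =====
def Spec_classify_protection_function_py (code : String) (description : String) (value : String) (out : Option String) : Prop := out = classify_protection_function_py_alt code description value
instance (code : String) (description : String) (value : String) (out : Option String) : Decidable (Spec_classify_protection_function_py code description value out) := by unfold Spec_classify_protection_function_py; infer_instance

-- ===== CLAIM (what is proved, stated in full; the proofs are below) =====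
def Claim_equal_classify_protection_function_py : Prop := ∀ (code : String) (description : String) (value : String), Dom_classify_protection_function_py code description value → Spec_classify_protection_function_py code description value (classify_protection_function_py code description value)

-- ===== LEMMAS AND PROOFS =====

-- "category c is matched somewhere in d" read off the flat table
def pvMatch (d : String) (c : Nat) : Bool :=
  pvKeywords.any (fun kp => kp.2 == c && PySem.Str.isIn kp.1 d)

theorem pvStep_le (l : List Char) (K : List (String × Nat)) (best : Nat) :
    pvStep l best K ≤ best := by
  induction K generalizing best with
  | nil => exact Nat.le_refl best
  | cons kp K ih =>
      simp only [pvStep, List.foldl_cons]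
      split
      · exact Nat.le_trans (ih _) (Nat.le_of_lt (by omega))
      · exact ih best

theorem pvStep_min (l : List Char) (K : List (String × Nat)) (best : Nat)
    (kp : String × Nat) (hmem : kp ∈ K)
    (hpre : PySem.Chars.startswith l kp.1.toList = true) :
    pvStep l best K ≤ kp.2 := by
  induction K generalizing best with
  | nil => cases hmem
  | cons hd K ih =>
      rcases List.mem_cons.mp hmem with h | h
      · subst h
        simp only [pvStep, List.foldl_cons]
        by_cases hlt : kp.2 < best
        · simp [hlt, hpre]
          exact pvStep_le l K kp.2
        · simp [hlt]
          exact Nat.le_trans (pvStep_le l K best) (by omega)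
      · simp only [pvStep, List.foldl_cons]
        split
        · exact ih _ h
        · exact ih best h

theorem pvStep_cases (l : List Char) (K : List (String × Nat)) (best : Nat) :
    pvStep l best K = best ∨
      ∃ kp ∈ K, PySem.Chars.startswith l kp.1.toList = true ∧ pvStep l best K = kp.2 := by
  induction K generalizing best with
  | nil => exact Or.inl rfl
  | cons hd K ih =>
      simp only [pvStep, List.foldl_cons]
      split
      · rename_i h
        rcases ih hd.2 with h' | ⟨kp, hm, hs, he⟩
        · exact Or.inr ⟨hd, List.mem_cons_self .., h.2, h'⟩
        · exact Or.inr ⟨kp, List.mem_cons_of_mem _ hm, hs, he⟩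
      · rcases ih best with h' | ⟨kp, hm, hs, he⟩
        · exact Or.inl h'
        · exact Or.inr ⟨kp, List.mem_cons_of_mem _ hm, hs, he⟩

theorem pvScan_le (K : List (String × Nat)) (l : List Char) (best : Nat) :
    pvScan K best l ≤ best := by
  induction l generalizing best with
  | nil => exact Nat.le_refl best
  | cons c rest ih =>
      exact Nat.le_trans (ih _) (pvStep_le _ _ _)

theorem pvScan_min (K : List (String × Nat)) (l : List Char) (best : Nat)
    (kp : String × Nat) (hmem : kp ∈ K) (j : Nat)
    (hpre : kp.1.toList <+: l.drop j) :
    pvScan K best l ≤ kp.2 ∨ kp.1.toList = [] := by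
  by_cases hnil : kp.1.toList = []
  · exact Or.inr hnil
  left
  induction l generalizing best j with
  | nil =>
      simp only [List.drop_nil, List.prefix_nil] at hpre
      exact absurd hpre hnil
  | cons c rest ih =>
      cases j with
      | zero =>
          have hs : PySem.Chars.startswith (c :: rest) kp.1.toList = true :=
            (PySem.Chars.startswith_iff _ _).mpr (by simpa using hpre)
          exact Nat.le_trans (pvScan_le K rest _) (pvStep_min _ _ _ _ hmem hs)
      | succ j =>
          exact ih _ _ (by simpa using hpre)
  -- (hnil case handled above)

theorem pvScan_cases (K : List (String × Nat)) (l : List Char) (best : Nat) :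
    pvScan K best l = best ∨
      ∃ kp ∈ K, (∃ j, kp.1.toList <+: l.drop j) ∧ pvScan K best l = kp.2 := by
  induction l generalizing best with
  | nil => exact Or.inl rfl
  | cons c rest ih =>
      simp only [pvScan]
      rcases ih (pvStep (c :: rest) best K) with h | ⟨kp, hm, ⟨j, hp⟩, he⟩
      · rcases pvStep_cases (c :: rest) K best with h' | ⟨kp, hm, hs, he⟩
        · exact Or.inl (h.trans h')
        · exact Or.inr ⟨kp, hm, ⟨0, by simpa using (PySem.Chars.startswith_iff _ _).mp hs⟩, h.trans he⟩
      · exact Or.inr ⟨kp, hm, ⟨j + 1, by simpa using hp⟩, he⟩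

-- if category c matches, the scan result is ≤ c
theorem pvScan_le_of_match (d : String) (c : Nat) (h : pvMatch d c = true) :
    pvScan pvKeywords 6 d.toList ≤ c := by
  rcases List.any_eq_true.mp h with ⟨kp, hmem, hkp⟩
  rcases Bool.and_eq_true_iff.mp hkp with ⟨hc, hin⟩
  have hc' : kp.2 = c := by simpa using hc
  have hinf : kp.1.toList <:+: d.toList := (PySem.Str.isIn_iff_infix _ _).mp hin
  have hj : ∃ j, kp.1.toList <+: d.toList.drop j :=
    (PySem.Chars.exists_prefix_drop_iff_isIn _ _).mpr ((PySem.Chars.isIn_iff_infix _ _).mpr hinf)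
  rcases hj with ⟨j, hj⟩
  rcases pvScan_min pvKeywords d.toList 6 kp hmem j hj with h | hnil
  · omega
  · -- no keyword in the table is empty
    exfalso
    have hne : kp.1.toList ≠ [] := by
      simp only [pvKeywords, List.mem_cons, List.not_mem_nil, or_false] at hmem
      rcases hmem with h|h|h|h|h|h|h|h|h|h|h|h|h|h|h|h|h|h|h|h|h|h|h|h|h|h <;> simp [h]
    exact hne hnil

-- if the scan result is below 6, that category matches
theorem pvMatch_of_scan_lt (d : String) (h : pvScan pvKeywords 6 d.toList < 6) :
    pvMatch d (pvScan pvKeywords 6 d.toList) = true := by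
  rcases pvScan_cases pvKeywords d.toList 6 with he | ⟨kp, hmem, ⟨j, hj⟩, he⟩
  · omega
  · have hin : PySem.Str.isIn kp.1 d = true := by
      rw [PySem.Str.isIn_iff_infix]
      exact (PySem.Chars.isIn_iff_infix _ _).mp
        ((PySem.Chars.exists_prefix_drop_iff_isIn _ _).mp ⟨j, hj⟩)
    refine List.any_eq_true.mpr ⟨kp, hmem, Bool.and_eq_true_iff.mpr ⟨?_, hin⟩⟩
    simp [he]

-- A's six `any` tests coincide with pvMatch read off the flat table (definitional)
theorem pvMatch_eq (d : String) :
    pvMatch d 0 = (["overcurrent", "i>>", "i>", "short circuit"].any (fun k => PySem.Str.isIn k d))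
  ∧ pvMatch d 1 = (["earth", "ground", "residual", "i0>", "sef"].any (fun k => PySem.Str.isIn k d))
  ∧ pvMatch d 2 = (["thermal", "overload", "temperature", "ith"].any (fun k => PySem.Str.isIn k d))
  ∧ pvMatch d 3 = (["negative", "i2>", "unbalance"].any (fun k => PySem.Str.isIn k d))
  ∧ pvMatch d 4 = (["voltage", "v<", "v>", "under", "over"].any (fun k => PySem.Str.isIn k d))
  ∧ pvMatch d 5 = (["stall", "start", "motor", "rotor", "locked"].any (fun k => PySem.Str.isIn k d)) := by
  exact ⟨rfl, rfl, rfl, rfl, rfl, rfl⟩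

theorem pv_if_eq (m : Nat → Bool) (r : Nat) (hle : r ≤ 6)
    (hmin : ∀ c, m c = true → r ≤ c) (hhit : r < 6 → m r = true) :
    (if m 0 = true then some "overcurrent"
     else if m 1 = true then some "earth_fault"
     else if m 2 = true then some "thermal"
     else if m 3 = true then some "negative_sequence"
     else if m 4 = true then some "voltage"
     else if m 5 = true then some "motor"
     else (none : Option String))
    = (if r < 6 then pvLabels[r]? else none) := by
  by_cases h0 : m 0 = true
  · have hrc : r = 0 := Nat.le_zero.mp (hmin 0 h0)
    simp [h0, hrc, pvLabels]
  by_cases h1 : m 1 = true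
  · have hrc : r = 1 := by
      have hub := hmin 1 h1
      rcases Nat.lt_or_ge r 1 with h | h
      · have hm := hhit (by omega)
        interval_cases r
        · exact absurd hm h0
      · omega
    simp [h0, h1, hrc, pvLabels]
  by_cases h2 : m 2 = true
  · have hrc : r = 2 := by
      have hub := hmin 2 h2
      rcases Nat.lt_or_ge r 2 with h | h
      · have hm := hhit (by omega)
        interval_cases r
        · exact absurd hm h0
        · exact absurd hm h1
      · omega
    simp [h0, h1, h2, hrc, pvLabels]
  by_cases h3 : m 3 = true
  · have hrc : r = 3 := by
      have hub := hmin 3 h3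
      rcases Nat.lt_or_ge r 3 with h | h
      · have hm := hhit (by omega)
        interval_cases r
        · exact absurd hm h0
        · exact absurd hm h1
        · exact absurd hm h2
      · omega
    simp [h0, h1, h2, h3, hrc, pvLabels]
  by_cases h4 : m 4 = true
  · have hrc : r = 4 := by
      have hub := hmin 4 h4
      rcases Nat.lt_or_ge r 4 with h | h
      · have hm := hhit (by omega)
        interval_cases r
        · exact absurd hm h0
        · exact absurd hm h1
        · exact absurd hm h2
        · exact absurd hm h3
      · omega
    simp [h0, h1, h2, h3, h4, hrc, pvLabels]
  by_cases h5 : m 5 = true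
  · have hrc : r = 5 := by
      have hub := hmin 5 h5
      rcases Nat.lt_or_ge r 5 with h | h
      · have hm := hhit (by omega)
        interval_cases r
        · exact absurd hm h0
        · exact absurd hm h1
        · exact absurd hm h2
        · exact absurd hm h3
        · exact absurd hm h4
      · omega
    simp [h0, h1, h2, h3, h4, h5, hrc, pvLabels]
  have hr6 : r = 6 := by
    rcases Nat.lt_or_ge r 6 with h | h
    · have hm := hhit h
      interval_cases r
      · exact absurd hm h0
      · exact absurd hm h1
      · exact absurd hm h2
      · exact absurd hm h3
      · exact absurd hm h4
      · exact absurd hm h5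
    · omega
  simp [h0, h1, h2, h3, h4, h5, hr6]

theorem pv_main (code description value : String) :
    classify_protection_function_py code description value
      = classify_protection_function_py_alt code description value := by
  unfold classify_protection_function_py classify_protection_function_py_alt
  set d := PySem.Str.lower description with hd
  obtain ⟨e0, e1, e2, e3, e4, e5⟩ := pvMatch_eq d
  simp only [← e0, ← e1, ← e2, ← e3, ← e4, ← e5]
  exact pv_if_eq (pvMatch d) (pvScan pvKeywords 6 d.toList) (pvScan_le _ _ _)
    (fun c h => pvScan_le_of_match d c h) (fun h => pvMatch_of_scan_lt d h)

-- ===== VERDICT (by name: the statement is the Claim_ definition above) =====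
theorem classify_protection_function_py_spec : Claim_equal_classify_protection_function_py := by
  intro code description value _
  unfold Spec_classify_protection_function_py
  exact pv_main code description value
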